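-- pv_equiv track=rewrite | github.com/Seregawpn/Nexy_server | server/modules/memory_management/providers/memory_analyzer.py | _split_memory_facts
-- ===== SOURCE A (Python) =====
-- def _split_memory_facts(value: str) -> list[str]:
--     if not value:
--         return []
--     parts = []
--     for line in value.splitlines():
--         for part in line.split(";"):
--             cleaned = part.strip()
--             if cleaned:
--                 parts.append(cleaned)
--     return parts
-- ===== SOURCE B (Python) =====
-- def _split_memory_facts(value: str) -> list[str]:
--     parts = []
--     buf = []
--     for ch in value:
--         if ch in ";\n\r":
--             cleaned = "".join(buf).strip()
--             if cleaned:
--                 parts.append(cleaned)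
--             buf = []
--         else:
--             buf.append(ch)
--     cleaned = "".join(buf).strip()
--     if cleaned:
--         parts.append(cleaned)
--     return parts
-- ===== Notes on version B (the rewrite author's own statement) =====
-- stated objective: simpler
-- what changed: Replaced the nested splitlines/split-on-semicolon loops by a single character-level scan that accumulates a buffer and flushes a stripped, non-empty fact at each semicolon or line-break character; empty segments (including the CRLF case) vanish in the non-empty filter, so the output is identical on the ASCII domain.
import Mathlib
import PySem

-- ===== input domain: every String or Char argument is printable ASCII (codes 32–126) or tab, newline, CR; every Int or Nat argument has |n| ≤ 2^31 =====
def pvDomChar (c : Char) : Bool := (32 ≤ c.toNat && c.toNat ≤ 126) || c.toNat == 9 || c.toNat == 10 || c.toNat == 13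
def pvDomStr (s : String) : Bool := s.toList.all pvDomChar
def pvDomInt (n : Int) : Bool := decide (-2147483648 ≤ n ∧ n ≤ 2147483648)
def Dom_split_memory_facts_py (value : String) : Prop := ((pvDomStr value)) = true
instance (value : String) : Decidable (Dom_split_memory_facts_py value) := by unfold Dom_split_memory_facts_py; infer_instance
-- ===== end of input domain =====

-- B replaces A's nested splitlines/split(';') loops by one character-level scan with a buffer; objective: simpler.

-- ===== PORT A =====
def split_memory_facts_py (value : String) : List String :=
  if value = "" then []
  else
    (PySem.Str.splitlines value).foldl
      (fun parts line =>
        (PySem.Chars.splitOn line.toList [';']).foldl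
          (fun ps part =>
            let cleaned := PySem.Chars.strip part
            if cleaned ≠ [] then ps ++ [String.ofList cleaned] else ps)
          parts)
      []

-- ===== PORT B =====
-- flush: strip the buffer and append it when non-empty (B's 'cleaned = "".join(buf).strip(); if cleaned: parts.append(cleaned)')
def pvFlush (parts : List String) (buf : List Char) : List String :=
  let cleaned := PySem.Chars.strip buf
  if cleaned ≠ [] then parts ++ [String.ofList cleaned] else parts

-- one step of B's character loop
def pvStep (st : List String × List Char) (c : Char) : List String × List Char :=
  if c = ';' ∨ c = '\n' ∨ c = '\r' then (pvFlush st.1 st.2, [])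
  else (st.1, st.2 ++ [c])

def split_memory_facts_py_alt (value : String) : List String :=
  let st := value.toList.foldl pvStep ([], [])
  pvFlush st.1 st.2

-- ===== PRECONDITION & SPEC =====
def Spec_split_memory_facts_py (value : String) (out : List String) : Prop := out = split_memory_facts_py_alt value
instance (value : String) (out : List String) : Decidable (Spec_split_memory_facts_py value out) := by unfold Spec_split_memory_facts_py; infer_instance

-- ===== CLAIM (what is proved, stated in full; the proofs are below) =====
def Claim_equal_split_memory_facts_py : Prop := ∀ (value : String), Dom_split_memory_facts_py value → Spec_split_memory_facts_py value (split_memory_facts_py value)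

-- ===== LEMMAS AND PROOFS =====

-- proof-side helpers: direct recursions for the two splitting strategies
def pvConsH (c : Char) : List (List Char) → List (List Char)
  | [] => [[c]]
  | h :: t => (c :: h) :: t

-- Python line-boundary test restricted as splitlines uses it
def pvIsB (c : Char) : Bool :=
  decide (c.toNat = 10) || decide (c.toNat = 13) || decide (c.toNat = 11) || decide (c.toNat = 12) ||
  decide (c.toNat = 28) || decide (c.toNat = 29) || decide (c.toNat = 30) || decide (c.toNat = 133) ||
  decide (c.toNat = 8232) || decide (c.toNat = 8233)

def pvLines : List Char → List (List Char)
  | [] => []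
  | '\r' :: '\n' :: cs => [] :: pvLines cs
  | c :: cs => if pvIsB c then [] :: pvLines cs else pvConsH c (pvLines cs)

def pvSplitSemi : List Char → List (List Char)
  | [] => [[]]
  | c :: cs => if c = ';' then [] :: pvSplitSemi cs else pvConsH c (pvSplitSemi cs)

def pvMySplit : List Char → List (List Char)
  | [] => [[]]
  | c :: cs => if c = ';' ∨ c = '\n' ∨ c = '\r' then [] :: pvMySplit cs else pvConsH c (pvMySplit cs)

def pvEmitF (p : List Char) : Option String :=
  let cleaned := PySem.Chars.strip p
  if cleaned = [] then none else some (String.ofList cleaned)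

def pvEmit (L : List (List Char)) : List String := L.filterMap pvEmitF

def pvNe0 (L : List (List Char)) : List (List Char) := L.filter (fun p => !p.isEmpty)

def pvI (L1 L2 : List (List Char)) : Prop := L1.headD [] = L2.headD [] ∧ pvNe0 L1 = pvNe0 L2

lemma pvSplitSemi_ne_nil (cs : List Char) : pvSplitSemi cs ≠ [] := by
  cases cs with
  | nil => simp [pvSplitSemi]
  | cons c cs =>
    simp only [pvSplitSemi]
    split
    · simp
    · cases h : pvSplitSemi cs <;> simp [pvConsH]

lemma pvMySplit_ne_nil (cs : List Char) : pvMySplit cs ≠ [] := by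
  cases cs with
  | nil => simp [pvMySplit]
  | cons c cs =>
    simp only [pvMySplit]
    split
    · simp
    · cases h : pvMySplit cs <;> simp [pvConsH]

-- splitlines.go characterized by pvLines
def pvGlue (b : List Char) : List (List Char) → List (List Char)
  | [] => if b.isEmpty then [] else [b]
  | h :: t => (b ++ h) :: t

lemma pvGlue_nil (L : List (List Char)) : pvGlue [] L = L := by
  cases L with
  | nil => simp [pvGlue]
  | cons h t => simp [pvGlue]

lemma pvGlue_consH (b : List Char) (c : Char) (L : List (List Char)) :
    pvGlue (b ++ [c]) L = pvGlue b (pvConsH c L) := by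
  cases L with
  | nil => simp [pvGlue, pvConsH]
  | cons h t => simp [pvGlue, pvConsH]

lemma pvLines_step (c : Char) (cs : List Char)
    (h1 : ∀ (cs' : List Char), c = '\r' → cs = '\n' :: cs' → False) :
    pvLines (c :: cs) = if pvIsB c then [] :: pvLines cs else pvConsH c (pvLines cs) := by
  rw [pvLines.eq_3 c cs h1]

lemma pvSplitlines_go (cs : List Char) : ∀ (cur : List Char) (acc : List (List Char)),
    PySem.Chars.splitlines.go pvIsB cs cur acc = acc.reverse ++ pvGlue cur.reverse (pvLines cs) := by
  induction cs using pvLines.induct with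
  | case1 =>
    intro cur acc
    rw [PySem.Chars.splitlines.go.eq_1]
    simp only [pvLines, pvGlue]
    split <;> simp_all [List.isEmpty_iff]
  | case2 cs ih =>
    intro cur acc
    rw [PySem.Chars.splitlines.go.eq_2, ih]
    rw [show pvLines ('\r' :: '\n' :: cs) = [] :: pvLines cs from rfl]
    simp only [List.reverse_nil, pvGlue_nil]
    simp [pvGlue]
  | case3 c cs h1 hb ih =>
    intro cur acc
    rw [PySem.Chars.splitlines.go.eq_3 _ _ _ _ _ h1, pvLines_step c cs h1, if_pos hb, if_pos hb, ih]
    simp only [List.reverse_nil, pvGlue_nil]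
    simp [pvGlue]
  | case4 c cs h1 hb ih =>
    intro cur acc
    rw [PySem.Chars.splitlines.go.eq_3 _ _ _ _ _ h1, pvLines_step c cs h1, if_neg hb,
      if_neg (by simpa using hb), ih]
    rw [show (c :: cur).reverse = cur.reverse ++ [c] by simp, pvGlue_consH]

lemma pvSplitlines_eq (cs : List Char) : PySem.Chars.splitlines cs = pvLines cs := by
  have h : PySem.Chars.splitlines cs = PySem.Chars.splitlines.go pvIsB cs [] [] := rfl
  rw [h, pvSplitlines_go]
  simp only [List.reverse_nil, pvGlue_nil, List.nil_append]

-- splitOn.go on sep = [';'] characterized by pvSplitSemi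
def pvPrep (b : List Char) : List (List Char) → List (List Char)
  | [] => [b]
  | h :: t => (b ++ h) :: t

lemma pvPrep_consH (b : List Char) (c : Char) (L : List (List Char)) :
    pvPrep (b ++ [c]) L = pvPrep b (pvConsH c L) := by
  cases L with
  | nil => simp [pvPrep, pvConsH]
  | cons h t => simp [pvPrep, pvConsH]

lemma pvSplitOn_go (fuel : Nat) : ∀ (l cur : List Char) (acc : List (List Char)),
    l.length ≤ fuel →
    PySem.Chars.splitOn.go [';'] fuel l cur acc = acc.reverse ++ pvPrep cur.reverse (pvSplitSemi l) := by
  induction fuel with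
  | zero =>
    intro l cur acc hl
    interval_cases hl' : l.length
    rw [List.length_eq_zero_iff] at hl'
    subst hl'
    simp [PySem.Chars.splitOn.go, pvSplitSemi, pvPrep]
  | succ fuel ih =>
    intro l cur acc hl
    cases l with
    | nil => simp [PySem.Chars.splitOn.go, pvSplitSemi, pvPrep]
    | cons c rest =>
      rw [show PySem.Chars.splitOn.go [';'] (fuel+1) (c :: rest) cur acc
            = if [';'].isPrefixOf (c :: rest) then
                PySem.Chars.splitOn.go [';'] fuel (List.drop 1 (c :: rest)) [] (cur.reverse :: acc)
              else PySem.Chars.splitOn.go [';'] fuel rest (c :: cur) acc from rfl]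
      by_cases hc : c = ';'
      · subst hc
        rw [if_pos (by simp [List.isPrefixOf])]
        rw [ih _ _ _ (by simpa using Nat.le_of_succ_le_succ hl)]
        simp only [List.drop_succ_cons, List.drop_zero, List.reverse_nil]
        rw [show pvSplitSemi (';' :: rest) = [] :: pvSplitSemi rest by
              simp [pvSplitSemi]]
        rcases hs : pvSplitSemi rest with _ | ⟨h0, t0⟩
        · exact absurd hs (pvSplitSemi_ne_nil rest)
        · rw [show pvPrep [] (h0 :: t0) = h0 :: t0 by simp [pvPrep]]
          rw [show pvPrep cur.reverse ([] :: h0 :: t0) = cur.reverse :: h0 :: t0 by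
                simp [pvPrep]]
          rw [List.reverse_cons, List.append_assoc]
          rfl
      · rw [if_neg (by
              intro hpre
              simp only [List.isPrefixOf, Bool.and_eq_true, beq_iff_eq] at hpre
              exact hc hpre.1.symm)]
        rw [ih _ _ _ (by simpa using Nat.le_of_succ_le_succ hl)]
        simp only [pvSplitSemi, hc, if_false]
        rw [show (c :: cur).reverse = cur.reverse ++ [c] by simp, pvPrep_consH]

lemma pvSplitOn_eq (cs : List Char) : PySem.Chars.splitOn cs [';'] = pvSplitSemi cs := by
  show PySem.Chars.splitOn.go [';'] (cs.length + 1) cs [] [] = _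
  rw [pvSplitOn_go (cs.length + 1) cs [] [] (by omega)]
  rcases h : pvSplitSemi cs with _ | ⟨hd, tl⟩
  · exact absurd h (pvSplitSemi_ne_nil cs)
  · simp [pvPrep]

-- emit / filter machinery
lemma pvEmitF_nil : pvEmitF [] = none := rfl

lemma pvEmit_append (L1 L2 : List (List Char)) : pvEmit (L1 ++ L2) = pvEmit L1 ++ pvEmit L2 := by
  simp [pvEmit]

lemma pvEmit_ne0 (L : List (List Char)) : pvEmit L = pvEmit (pvNe0 L) := by
  induction L with
  | nil => rfl
  | cons h t ih =>
    by_cases hh : h = []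
    · subst hh
      simp only [pvEmit, pvNe0] at ih ⊢
      simp [pvEmitF_nil, ih]
    · have hb : (!h.isEmpty) = true := by simp [hh]
      simp only [pvEmit, pvNe0] at ih ⊢
      simp [hb, List.filterMap_cons, ih]

lemma pvI_emit {L1 L2 : List (List Char)} (h : pvI L1 L2) : pvEmit L1 = pvEmit L2 := by
  rw [pvEmit_ne0 L1, pvEmit_ne0 L2, h.2]

lemma pvI_cons_nil {L1 L2 : List (List Char)} (h : pvI L1 L2) : pvI ([] :: L1) ([] :: L2) := by
  exact ⟨rfl, by simpa [pvNe0] using h.2⟩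

lemma pvI_cons_nil2 {L1 L2 : List (List Char)} (h : pvI L1 L2) : pvI ([] :: [] :: L1) ([] :: L2) := by
  exact ⟨rfl, by simpa [pvNe0] using h.2⟩

lemma pvNe0_tail_eq (L : List (List Char)) :
    pvNe0 L.tail = if L.headD [] = [] then pvNe0 L else (pvNe0 L).tail := by
  cases L with
  | nil => simp [pvNe0]
  | cons h t =>
    by_cases hh : h = []
    · subst hh; simp [pvNe0]
    · simp [pvNe0, hh]

lemma pvI_consH (c : Char) {L1 L2 : List (List Char)} (h : pvI L1 L2) :
    pvI (pvConsH c L1) (pvConsH c L2) := by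
  obtain ⟨hh, hf⟩ := h
  have hhead : ∀ (L : List (List Char)), (pvConsH c L).headD [] = c :: L.headD [] := by
    intro L; cases L <;> simp [pvConsH]
  have hne0 : ∀ (L : List (List Char)), pvNe0 (pvConsH c L) = (c :: L.headD []) :: pvNe0 L.tail := by
    intro L; cases L with
    | nil => simp [pvConsH, pvNe0]
    | cons h t => simp [pvConsH, pvNe0]
  refine ⟨by rw [hhead, hhead, hh], ?_⟩
  rw [hne0, hne0, hh, pvNe0_tail_eq, pvNe0_tail_eq, hh, hf]

-- flatMap splitSemi commutes with consH for c ≠ ';'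
lemma pvFlatMap_consH (c : Char) (hc : c ≠ ';') (L : List (List Char)) :
    (pvConsH c L).flatMap pvSplitSemi = pvConsH c (L.flatMap pvSplitSemi) := by
  cases L with
  | nil => simp [pvConsH, pvSplitSemi, hc]
  | cons h t =>
    simp only [pvConsH, List.flatMap_cons]
    rw [show pvSplitSemi (c :: h) = pvConsH c (pvSplitSemi h) by simp [pvSplitSemi, hc]]
    rcases hs : pvSplitSemi h with _ | ⟨hd, tl⟩
    · exact absurd hs (pvSplitSemi_ne_nil h)
    · simp [pvConsH]

lemma pvLines_ne_nil (c : Char) (cs : List Char) : pvLines (c :: cs) ≠ [] := by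
  by_cases h : c = '\r' ∧ ∃ cs', cs = '\n' :: cs'
  · obtain ⟨rfl, cs', rfl⟩ := h
    simp [pvLines]
  · have h1 : ∀ (cs' : List Char), c = '\r' → cs = '\n' :: cs' → False := by
      intro cs' hc hcs; exact h ⟨hc, cs', hcs⟩
    rw [pvLines_step c cs h1]
    split
    · simp
    · cases pvLines cs <;> simp [pvConsH]

-- the key lemma: on the domain, B's one-pass split and A's lines-then-semicolons split
-- agree up to empty segments
lemma pvKey (cs : List Char) (hd : cs.all pvDomChar = true) :
    pvI (pvMySplit cs) ((pvLines cs).flatMap pvSplitSemi) := by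
  induction cs using pvLines.induct with
  | case1 => exact ⟨rfl, rfl⟩
  | case2 cs ih =>
    simp only [List.all_cons, Bool.and_eq_true] at hd
    have h := ih hd.2.2
    rw [show pvMySplit ('\r' :: '\n' :: cs) = [] :: [] :: pvMySplit cs by simp [pvMySplit]]
    rw [show pvLines ('\r' :: '\n' :: cs) = [] :: pvLines cs from rfl]
    simpa [pvSplitSemi] using pvI_cons_nil2 h
  | case3 c cs h1 hb ih =>
    simp only [List.all_cons, Bool.and_eq_true] at hd
    have h := ih hd.2
    have hdc := hd.1
    -- on the domain, a boundary char is '\n' or '\r'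
    have hc : c = '\n' ∨ c = '\r' := by
      have hb' : c.toNat = 10 ∨ c.toNat = 13 := by
        simp only [pvIsB, Bool.or_eq_true, decide_eq_true_eq] at hb
        simp only [pvDomChar, Bool.or_eq_true, Bool.and_eq_true, decide_eq_true_eq,
          beq_iff_eq] at hdc
        omega
      rcases hb' with h | h
      · exact Or.inl (Char.ext (UInt32.toNat_inj.mp h))
      · exact Or.inr (Char.ext (UInt32.toNat_inj.mp h))
    rw [show pvMySplit (c :: cs) = [] :: pvMySplit cs by
          simp only [pvMySplit]; rw [if_pos (Or.inr hc)]]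
    rw [pvLines_step c cs h1, if_pos hb]
    simpa [pvSplitSemi] using pvI_cons_nil h
  | case4 c cs h1 hb ih =>
    simp only [List.all_cons, Bool.and_eq_true] at hd
    have h := ih hd.2
    have hcn : c ≠ '\n' := by rintro rfl; simp [pvIsB] at hb
    have hcr : c ≠ '\r' := by rintro rfl; simp [pvIsB] at hb
    rw [pvLines_step c cs h1, if_neg (by simp [hb])]
    by_cases hc : c = ';'
    · subst hc
      rw [show pvMySplit (';' :: cs) = [] :: pvMySplit cs by simp [pvMySplit]]
      by_cases hnil : cs = []
      · subst hnil
        exact ⟨rfl, rfl⟩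
      · rcases hL : pvLines cs with _ | ⟨hd', tl⟩
        · cases cs with
          | nil => exact absurd rfl hnil
          | cons c0 cs0 => exact absurd hL (pvLines_ne_nil c0 cs0)
        · rw [hL] at h
          rw [show pvConsH ';' (hd' :: tl) = (';' :: hd') :: tl from rfl]
          simp only [List.flatMap_cons]
          rw [show pvSplitSemi (';' :: hd') = [] :: pvSplitSemi hd' by simp [pvSplitSemi]]
          rw [List.cons_append]
          exact pvI_cons_nil (by simpa [List.flatMap_cons] using h)
    · rw [show pvMySplit (c :: cs) = pvConsH c (pvMySplit cs) by
            simp [pvMySplit, hc, hcn, hcr]]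
      rw [pvFlatMap_consH c hc]
      exact pvI_consH c h

-- A's nested foldl computes pvEmit of the flattened segments
lemma pvInner_foldl (segs : List (List Char)) (parts : List String) :
    segs.foldl (fun ps part =>
      let cleaned := PySem.Chars.strip part
      if cleaned ≠ [] then ps ++ [String.ofList cleaned] else ps) parts
    = parts ++ pvEmit segs := by
  induction segs generalizing parts with
  | nil => simp [pvEmit]
  | cons h t ih =>
    simp only [List.foldl_cons, ih]
    by_cases hh : PySem.Chars.strip h = []
    · simp [pvEmit, pvEmitF, hh]
    · simp [pvEmit, pvEmitF, hh]

lemma pvOuter_foldl (L : List (List Char)) : ∀ (init : List String),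
    L.foldl
      (fun parts l => (pvSplitSemi l).foldl (fun ps part =>
        let cleaned := PySem.Chars.strip part
        if cleaned ≠ [] then ps ++ [String.ofList cleaned] else ps) parts) init
    = init ++ pvEmit (L.flatMap pvSplitSemi) := by
  induction L with
  | nil => intro init; simp [pvEmit]
  | cons hL tL ih =>
    intro init
    simp only [List.foldl_cons]
    rw [pvInner_foldl, ih, List.flatMap_cons, pvEmit_append, List.append_assoc]

lemma pvA_emit (cs : List Char) :
    (pvLines cs).foldl
      (fun parts l => (pvSplitSemi l).foldl (fun ps part =>
        let cleaned := PySem.Chars.strip part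
        if cleaned ≠ [] then ps ++ [String.ofList cleaned] else ps) parts) []
    = pvEmit ((pvLines cs).flatMap pvSplitSemi) := by
  rw [pvOuter_foldl, List.nil_append]

-- B's character fold computes pvEmit of pvMySplit
lemma pvFlush_emit (parts : List String) (buf : List Char) :
    pvFlush parts buf = parts ++ pvEmit [buf] := by
  by_cases hh : PySem.Chars.strip buf = []
  · simp [pvFlush, pvEmit, pvEmitF, hh]
  · simp [pvFlush, pvEmit, pvEmitF, hh]

lemma pvB_run (cs : List Char) : ∀ (parts : List String) (buf : List Char),
    (let st := cs.foldl pvStep (parts, buf); pvFlush st.1 st.2)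
    = parts ++ pvEmit (pvPrep buf (pvMySplit cs)) := by
  induction cs with
  | nil =>
    intro parts buf
    simp only [List.foldl_nil]
    rw [show pvPrep buf (pvMySplit []) = [buf] by simp [pvMySplit, pvPrep]]
    exact pvFlush_emit parts buf
  | cons c cs ih =>
    intro parts buf
    by_cases hc : c = ';' ∨ c = '\n' ∨ c = '\r'
    · simp only [List.foldl_cons, pvStep, if_pos hc]
      rw [ih (pvFlush parts buf) [], pvFlush_emit]
      rw [show pvMySplit (c :: cs) = [] :: pvMySplit cs by
            simp only [pvMySplit]; rw [if_pos hc]]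
      rw [show pvPrep buf ([] :: pvMySplit cs) = buf :: pvMySplit cs by simp [pvPrep]]
      rcases hM : pvMySplit cs with _ | ⟨hd, tl⟩
      · exact absurd hM (pvMySplit_ne_nil cs)
      · rw [show pvPrep [] (hd :: tl) = hd :: tl by simp [pvPrep]]
        simp only [pvEmit, List.append_assoc]
        rw [← List.filterMap_append]
        rfl
    · simp only [List.foldl_cons, pvStep, if_neg hc]
      rw [ih parts (buf ++ [c])]
      rw [show pvMySplit (c :: cs) = pvConsH c (pvMySplit cs) by
            simp only [pvMySplit, if_neg hc]]
      rw [pvPrep_consH]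

lemma pvB_eq (value : String) :
    split_memory_facts_py_alt value = pvEmit (pvMySplit value.toList) := by
  rw [split_memory_facts_py_alt, pvB_run value.toList [] []]
  rcases hM : pvMySplit value.toList with _ | ⟨hd, tl⟩
  · exact absurd hM (pvMySplit_ne_nil value.toList)
  · simp [pvPrep]

lemma pvA_eq (value : String) :
    split_memory_facts_py value = pvEmit ((pvLines value.toList).flatMap pvSplitSemi) := by
  rw [split_memory_facts_py]
  by_cases hv : value = ""
  · subst hv
    simp [pvLines, pvEmit]
  · rw [if_neg hv, PySem.Str.splitlines, pvSplitlines_eq, ← pvA_emit]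
    rw [List.foldl_map]
    congr 1
    funext parts line
    rw [show (String.ofList line).toList = line by simp]
    rw [pvSplitOn_eq]

-- ===== VERDICT (by name: the statement is the Claim_ definition above) =====
theorem split_memory_facts_py_spec : Claim_equal_split_memory_facts_py := by
  intro value hdom
  show split_memory_facts_py value = split_memory_facts_py_alt value
  rw [pvA_eq, pvB_eq]
  refine (pvI_emit (pvKey value.toList ?_)).symm
  have h := hdom
  unfold Dom_split_memory_facts_py pvDomStr at h
  exact h
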